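-- pv_equiv track=rewrite | github.com/jonodrew/aoc-2021 | day_16/decoder.py | read_literal_value
-- ===== SOURCE A (Python) =====
-- from typing import Iterator, Tuple, Union, List
--
-- def read_literal_value(value: str, indicator_var_pos: int) -> Tuple[str, int]:
--     indicator_var = value[indicator_var_pos]
--     word_start = indicator_var_pos + 1
--     word_end = word_start + 4
--     this_word = value[word_start: word_end]
--     if indicator_var == "0":
--         return this_word, word_end
--     else:
--         next_word, new_pointer = read_literal_value(value, word_end)
--         return this_word + next_word, new_pointer
-- ===== SOURCE B (Python) =====
-- def read_literal_value(value, indicator_var_pos):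
--     # Phase 1: count the groups by probing only the indicator bits.
--     n = 0
--     while value[indicator_var_pos + 5 * n] != "0":
--         n += 1
--     n += 1
--     # Phase 2: collect the n payload chunks directly by arithmetic slicing.
--     chunks = [value[indicator_var_pos + 5 * i + 1: indicator_var_pos + 5 * i + 5]
--               for i in range(n)]
--     return "".join(chunks), indicator_var_pos + 5 * n
-- ===== Notes on version B (the rewrite author's own statement) =====
-- stated objective: alternative
-- what changed: Replaced the single non-tail recursion that reads indicator+payload together and rebuilds the result on the way back with two staged passes: first a scan over only the indicator bits that counts the groups, then a comprehension+join that extracts all payload chunks by pure index arithmetic.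
import Mathlib
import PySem

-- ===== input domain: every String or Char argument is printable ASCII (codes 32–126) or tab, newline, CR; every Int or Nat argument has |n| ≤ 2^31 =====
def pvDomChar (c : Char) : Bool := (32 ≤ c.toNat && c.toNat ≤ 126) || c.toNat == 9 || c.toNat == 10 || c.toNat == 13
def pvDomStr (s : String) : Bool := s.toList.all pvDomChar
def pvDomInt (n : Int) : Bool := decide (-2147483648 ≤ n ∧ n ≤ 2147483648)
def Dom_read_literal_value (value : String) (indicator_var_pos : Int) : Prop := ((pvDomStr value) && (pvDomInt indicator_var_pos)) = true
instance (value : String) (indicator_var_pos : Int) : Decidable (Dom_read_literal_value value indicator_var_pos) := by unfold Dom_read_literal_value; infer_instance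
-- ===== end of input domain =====

-- B replaces A's non-tail recursion with two staged passes: an indicator-only scan that
-- counts the groups, then index-arithmetic slicing + join of all payload chunks.


-- ===== PORT A =====
-- A's recursion, made total with a fuel counter (value.length + 2 always exceeds the
-- chain length, see rlvA_fuel_enough below); when value[pos] is out of range Python
-- raises IndexError (excluded by Pre_), the port returns ("", pos) there.
def rlvA (value : String) (fuel : Nat) (indicator_var_pos : Int) : String × Int :=
  match fuel with
  | 0 => ("", indicator_var_pos)  -- never reached from read_literal_value's initial fuel
  | fuel + 1 =>
    match PySem.Str.pyGet? value indicator_var_pos with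
    | none => ("", indicator_var_pos)  -- IndexError in Python; outside Pre_
    | some indicator_var =>
        let word_start := indicator_var_pos + 1
        let word_end := word_start + 4
        let this_word := PySem.Str.slice value (some word_start) (some word_end)
        if indicator_var = '0' then
          (this_word, word_end)
        else
          let r := rlvA value fuel word_end
          (this_word ++ r.1, r.2)

def read_literal_value (value : String) (indicator_var_pos : Int) : String × Int :=
  rlvA value (value.toList.length + 2) indicator_var_pos

-- ===== PORT B =====
-- Phase 1 of Source B: the counting loop over the indicator bits only (same fuel guard);
-- `none` is the IndexError case of Python (outside Pre_).
def rlvCount (value : String) (base : Int) (fuel : Nat) (k : Nat) : Option Nat :=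
  match fuel with
  | 0 => none  -- never reached from read_literal_value_alt's initial fuel
  | fuel + 1 =>
    match PySem.Str.pyGet? value (base + 5 * k) with
    | none => none  -- IndexError in Python; outside Pre_
    | some c => if c ≠ '0' then rlvCount value base fuel (k + 1) else some (k + 1)

def read_literal_value_alt (value : String) (indicator_var_pos : Int) : String × Int :=
  match rlvCount value indicator_var_pos (value.toList.length + 2) 0 with
  | none => ("", indicator_var_pos)  -- IndexError in Python; outside Pre_
  | some n =>
      -- Phase 2 of Source B: the chunk comprehension and "".join.
      let chunks := (List.range n).map (fun (i : Nat) =>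
        PySem.Str.slice value (some (indicator_var_pos + 5 * (i : Int) + 1))
                              (some (indicator_var_pos + 5 * (i : Int) + 5)))
      (String.join chunks, indicator_var_pos + 5 * n)

-- ===== PRECONDITION & SPEC =====
-- Pre_: exactly the inputs on which Python A returns (the 5-step chain of indicator
-- positions stays in range and reaches a '0' indicator); elsewhere A raises IndexError.
def Pre_read_literal_value (value : String) (indicator_var_pos : Int) : Prop :=
  ∃ k < value.toList.length + 1,
    (∀ i < k, PySem.Str.pyGet? value (indicator_var_pos + 5 * (i : Int)) ≠ none ∧
              PySem.Str.pyGet? value (indicator_var_pos + 5 * (i : Int)) ≠ some '0') ∧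
    PySem.Str.pyGet? value (indicator_var_pos + 5 * (k : Int)) = some '0'
instance (value : String) (indicator_var_pos : Int) : Decidable (Pre_read_literal_value value indicator_var_pos) := by
  unfold Pre_read_literal_value; infer_instance

def pvWitness_read_literal_value : String × Int := ("1abcd0efgh", 0)

def Spec_read_literal_value (value : String) (indicator_var_pos : Int) (out : String × Int) : Prop := out = read_literal_value_alt value indicator_var_pos
instance (value : String) (indicator_var_pos : Int) (out : String × Int) : Decidable (Spec_read_literal_value value indicator_var_pos out) := by unfold Spec_read_literal_value; infer_instance

-- ===== CLAIM (what is proved, stated in full; the proofs are below) =====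
def Claim_equal_read_literal_value : Prop := ∀ (value : String) (indicator_var_pos : Int), Dom_read_literal_value value indicator_var_pos → Pre_read_literal_value value indicator_var_pos → Spec_read_literal_value value indicator_var_pos (read_literal_value value indicator_var_pos)

-- ===== LEMMAS AND PROOFS =====

theorem foldl_append_init (l : List String) :
    ∀ a : String, List.foldl (fun r s => r ++ s) a l = a ++ List.foldl (fun r s => r ++ s) "" l := by
  induction l with
  | nil => intro a; simp
  | cons x xs ih =>
      intro a
      simp only [List.foldl]
      rw [ih (a ++ x), ih ("" ++ x)]
      simp [String.append_assoc]

theorem join_cons (a : String) (l : List String) :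
    String.join (a :: l) = a ++ String.join l := by
  simp only [String.join, List.foldl]
  rw [show ("" ++ a : String) = a by simp]
  exact foldl_append_init l a

theorem rlvCount_lt (value : String) (base : Int) :
    ∀ fuel k n, rlvCount value base fuel k = some n → k < n := by
  intro fuel
  induction fuel with
  | zero => intro k n h; exact absurd h (by simp [rlvCount])
  | succ fuel ih =>
      intro k n h
      rw [rlvCount] at h
      rcases hg : PySem.Str.pyGet? value (base + 5 * k) with _ | c
      · rw [hg] at h; exact absurd h (by simp)
      · rw [hg] at h
        by_cases hc : c ≠ '0'
        · simp only [if_pos hc] at h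
          exact Nat.lt_of_succ_lt (Nat.lt_of_succ_le (ih (k + 1) n h))
        · simp only [if_neg hc] at h
          have : k + 1 = n := by injection h
          omega

-- Main invariant: the two recursions consume fuel in lockstep — if the indicator scan
-- from step k returns the count n, A's recursion from position base+5k (same fuel)
-- produces exactly the chunks k .. n-1 and pointer base+5n.
theorem rlv_main (value : String) (base : Int) (n : Nat) :
    ∀ fuel k, rlvCount value base fuel k = some n →
      rlvA value fuel (base + 5 * k) =
        (String.join (((List.range n).map (fun (i : Nat) =>
            PySem.Str.slice value (some (base + 5 * (i : Int) + 1))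
                                  (some (base + 5 * (i : Int) + 5)))).drop k),
         base + 5 * n) := by
  intro fuel
  induction fuel with
  | zero => intro k hk; exact absurd hk (by simp [rlvCount])
  | succ fuel ih =>
      intro k hk
      rw [rlvCount] at hk
      rw [rlvA]
      rcases hg : PySem.Str.pyGet? value (base + 5 * k) with _ | c
      · rw [hg] at hk; exact absurd hk (by simp)
      · rw [hg] at hk
        by_cases hc : c ≠ '0'
        · simp only [if_pos hc] at hk
          have hlt : k + 1 < n := rlvCount_lt value base fuel (k + 1) n hk
          have ih' := ih (k + 1) hk
          have hcast : base + 5 * ((k + 1 : Nat) : Int) = base + 5 * (k : Int) + 5 := by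
            push_cast; ring
          rw [hcast] at ih'
          simp only [if_neg hc]
          have h45 : base + 5 * (k : Int) + 1 + 4 = base + 5 * (k : Int) + 5 := by ring
          have hdrop : (((List.range n).map (fun (i : Nat) =>
              PySem.Str.slice value (some (base + 5 * (i : Int) + 1))
                                    (some (base + 5 * (i : Int) + 5)))).drop k) =
              (PySem.Str.slice value (some (base + 5 * (k : Int) + 1)) (some (base + 5 * (k : Int) + 5))) ::
              (((List.range n).map (fun (i : Nat) =>
                PySem.Str.slice value (some (base + 5 * (i : Int) + 1))
                                      (some (base + 5 * (i : Int) + 5)))).drop (k + 1)) := by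
            rw [List.drop_eq_getElem_cons (by simpa using Nat.lt_of_succ_lt hlt)]
            simp
          simp only [h45, ih', hdrop, join_cons]
        · simp only [if_neg hc] at hk
          have hn : k + 1 = n := by injection hk
          subst hn
          have hc0 : c = '0' := not_not.mp hc
          subst hc0
          have h45 : base + 5 * (k : Int) + 1 + 4 = base + 5 * (k : Int) + 5 := by ring
          have hdrop : (((List.range (k + 1)).map (fun (i : Nat) =>
              PySem.Str.slice value (some (base + 5 * (i : Int) + 1))
                                    (some (base + 5 * (i : Int) + 5)))).drop k) =
              [PySem.Str.slice value (some (base + 5 * (k : Int) + 1)) (some (base + 5 * (k : Int) + 5))] := by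
            rw [List.drop_eq_getElem_cons (by simp)]
            simp
          simp only [h45, hdrop, if_true, String.join, List.foldl, Prod.mk.injEq]
          refine ⟨by simp, by push_cast; ring⟩

-- Under Pre_ the initial fuel value.length + 2 is ample: the '0' indicator sits at
-- chain step k ≤ value.length, so the scan returns within k + 1 ≤ fuel steps.
theorem pre_count (value : String) (base : Int) :
    Pre_read_literal_value value base →
      ∃ n, rlvCount value base (value.toList.length + 2) 0 = some n := by
  rintro ⟨k, hk, hmid, hend⟩
  suffices h : ∀ fuel j, j ≤ k → k - j < fuel → ∃ n, rlvCount value base fuel j = some n by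
    exact h (value.toList.length + 2) 0 (Nat.zero_le k) (by omega)
  intro fuel
  induction fuel with
  | zero => intro j _ h; omega
  | succ fuel ih =>
      intro j hjk hfuel
      by_cases hjke : j = k
      · subst hjke
        refine ⟨j + 1, ?_⟩
        rw [rlvCount, hend]
        simp
      · have hjlt : j < k := lt_of_le_of_ne hjk hjke
        obtain ⟨hne, hn0⟩ := hmid j hjlt
        obtain ⟨c, hc⟩ := Option.ne_none_iff_exists'.mp hne
        obtain ⟨n, hn⟩ := ih (j + 1) (by omega) (by omega)
        have hcne : c ≠ '0' := by rintro rfl; exact hn0 hc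
        exact ⟨n, by rw [rlvCount, hc]; simp [hcne, hn]⟩

-- ===== VERDICT (by name: the statement is the Claim_ definition above) =====
theorem read_literal_value_spec : Claim_equal_read_literal_value := by
  intro value pos _ hpre
  unfold Spec_read_literal_value read_literal_value_alt read_literal_value
  obtain ⟨n, hn⟩ := pre_count value pos hpre
  rw [hn]
  have := rlv_main value pos n (value.toList.length + 2) 0 hn
  simpa using this
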